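-- pv_equiv track=rewrite | github.com/GezaLang/AoC_24 | day_4/day_4_2.py | count_xmas_shapes
-- ===== SOURCE A (Python) =====
-- def count_xmas_shapes(grid):
--     rows, cols = len(grid), len(grid[0])
--     count = 0
--     diagonal_offsets = [
--         (-1, -1, 1, 1),  # up-left to down-right
--         (-1, 1, 1, -1),  # up-right to down-left
--     ]
--
--     for i in range(rows):
--         for j in range(cols):
--             if grid[i][j] == 'A':  # Center of the potential mas
--                 valid_xmas = True
--                 for dx1, dy1, dx2, dy2 in diagonal_offsets:
--                     # Positions of "M" and "S" for each diagonal
--                     mx1, my1 = i + dx1, j + dy1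
--                     sx1, sy1 = i - dx1, j - dy1
--                     mx2, my2 = i + dx2, j + dy2
--                     sx2, sy2 = i - dx2, j - dy2
--
--                     # bound check -> got that with help of LLM
--                     if not all(0 <= nx < rows and 0 <= ny < cols for nx, ny in [(mx1, my1), (sx1, sy1), (mx2, my2), (sx2, sy2)]):
--                         valid_xmas = False
--                         break
--
--                     diagonal_1 = [grid[mx1][my1], grid[i][j], grid[sx1][sy1]]
--                     diagonal_2 = [grid[mx2][my2], grid[i][j], grid[sx2][sy2]]
--
--                     if not (diagonal_1 in [['M', 'A', 'S'], ['S', 'A', 'M']] and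
--                             diagonal_2 in [['M', 'A', 'S'], ['S', 'A', 'M']]):
--                         valid_xmas = False
--                         break
--
--                 if valid_xmas:
--                     count += 1
--
--     return count
-- ===== SOURCE B (Python) =====
-- def count_xmas_shapes(grid):
--     rows, cols = len(grid), len(grid[0])
--     set1 = {(i, j)
--             for i in range(1, rows - 1) for j in range(1, cols - 1)
--             if grid[i][j] == 'A'
--             and {grid[i - 1][j - 1], grid[i + 1][j + 1]} == {'M', 'S'}}
--     set2 = {(i, j)
--             for i in range(1, rows - 1) for j in range(1, cols - 1)
--             if grid[i][j] == 'A'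
--             and {grid[i - 1][j + 1], grid[i + 1][j - 1]} == {'M', 'S'}}
--     return len(set1 & set2)
-- ===== Notes on version B (the rewrite author's own statement) =====
-- stated objective: alternative
-- what changed: Instead of A's per-cell boolean conjunction with an inner offset loop and break, B builds two sets of 'A'-centered coordinates (one per diagonal, each requiring an {M,S} corner pair) by set comprehensions over the interior cells and returns the size of their intersection.
import Mathlib
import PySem

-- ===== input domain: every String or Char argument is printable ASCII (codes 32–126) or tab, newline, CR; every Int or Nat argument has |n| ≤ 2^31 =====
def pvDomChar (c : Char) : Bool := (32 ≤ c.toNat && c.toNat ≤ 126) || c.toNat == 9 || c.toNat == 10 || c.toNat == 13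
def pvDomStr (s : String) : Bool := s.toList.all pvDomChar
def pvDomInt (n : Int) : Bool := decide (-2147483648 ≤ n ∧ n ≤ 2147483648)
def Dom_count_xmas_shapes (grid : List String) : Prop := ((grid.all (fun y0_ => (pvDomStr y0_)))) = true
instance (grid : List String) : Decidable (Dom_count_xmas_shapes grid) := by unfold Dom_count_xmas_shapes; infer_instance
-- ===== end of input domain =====

-- B replaces A's per-cell boolean conjunction (inner offset loop with break) by building two sets of
-- 'A'-centered coordinates, one per diagonal, and returning the size of their intersection (objective: alternative).

-- ===== PORT A =====
-- grid[x][y]: total rendering of Python's subscription; inputs where Python would raise lie outside Pre_.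
def pvCell (grid : List String) (i j : Int) : Char :=
  ((PySem.List.pyGet? grid i).bind (fun r => PySem.List.pyGet? r.toList j)).getD ' '

def pvAllInb (rows cols : Int) (ps : List (Int × Int)) : Bool :=
  ps.all (fun p => decide (0 ≤ p.1 ∧ p.1 < rows ∧ 0 ≤ p.2 ∧ p.2 < cols))

def pvDiagOk (d : List Char) : Bool :=
  decide (d = ['M', 'A', 'S'] ∨ d = ['S', 'A', 'M'])

def pvCheckOffsets (grid : List String) (rows cols i j : Int) :
    List (Int × Int × Int × Int) → Bool
  | [] => true
  | (dx1, dy1, dx2, dy2) :: rest =>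
    let mx1 := i + dx1; let my1 := j + dy1
    let sx1 := i - dx1; let sy1 := j - dy1
    let mx2 := i + dx2; let my2 := j + dy2
    let sx2 := i - dx2; let sy2 := j - dy2
    if !(pvAllInb rows cols [(mx1, my1), (sx1, sy1), (mx2, my2), (sx2, sy2)]) then false
    else
      let d1 := [pvCell grid mx1 my1, pvCell grid i j, pvCell grid sx1 sy1]
      let d2 := [pvCell grid mx2 my2, pvCell grid i j, pvCell grid sx2 sy2]
      if !(pvDiagOk d1 && pvDiagOk d2) then false
      else pvCheckOffsets grid rows cols i j rest

def count_xmas_shapes (grid : List String) : Int :=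
  let rows := PySem.List.len grid
  let cols := PySem.Str.len (PySem.List.pyGetD grid 0 "")
  (PySem.List.pyRange 0 rows 1).foldl (fun count i =>
    (PySem.List.pyRange 0 cols 1).foldl (fun count j =>
      if pvCell grid i j == 'A' then
        if pvCheckOffsets grid rows cols i j [(-1, -1, 1, 1), (-1, 1, 1, -1)] then count + 1
        else count
      else count) count) 0

-- ===== PORT B =====
def pvPairIsMS (a b : Char) : Bool :=
  PySem.Set.equal (PySem.Set.ofList [a, b]) (PySem.Set.ofList ['M', 'S'])

def pvDiag1 (grid : List String) (i j : Int) : Bool :=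
  pvCell grid i j == 'A' && pvPairIsMS (pvCell grid (i - 1) (j - 1)) (pvCell grid (i + 1) (j + 1))

def pvDiag2 (grid : List String) (i j : Int) : Bool :=
  pvCell grid i j == 'A' && pvPairIsMS (pvCell grid (i - 1) (j + 1)) (pvCell grid (i + 1) (j - 1))

def count_xmas_shapes_alt (grid : List String) : Int :=
  let rows := PySem.List.len grid
  let cols := PySem.Str.len (PySem.List.pyGetD grid 0 "")
  let set1 : PySem.Set (Int × Int) := PySem.Set.ofList
    ((PySem.List.pyRange 1 (rows - 1) 1).flatMap (fun i =>
      ((PySem.List.pyRange 1 (cols - 1) 1).filter (fun j => pvDiag1 grid i j)).map (fun j => (i, j))))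
  let set2 : PySem.Set (Int × Int) := PySem.Set.ofList
    ((PySem.List.pyRange 1 (rows - 1) 1).flatMap (fun i =>
      ((PySem.List.pyRange 1 (cols - 1) 1).filter (fun j => pvDiag2 grid i j)).map (fun j => (i, j))))
  PySem.Set.len (PySem.Set.inter set1 set2)

-- ===== PRECONDITION & SPEC =====
-- Pre_ excludes exactly the inputs where Python A raises IndexError: the empty grid (grid[0]) and
-- ragged grids with some row shorter than the first one (grid[i][j] for j < len(grid[0])).
def Pre_count_xmas_shapes (grid : List String) : Prop :=
  grid ≠ [] ∧ ∀ s ∈ grid, PySem.Str.len (PySem.List.pyGetD grid 0 "") ≤ PySem.Str.len s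
instance (grid : List String) : Decidable (Pre_count_xmas_shapes grid) := by
  unfold Pre_count_xmas_shapes; infer_instance

def pvWitness_count_xmas_shapes : List String := ["M.S", ".A.", "M.S"]

def Spec_count_xmas_shapes (grid : List String) (out : Int) : Prop := out = count_xmas_shapes_alt grid
instance (grid : List String) (out : Int) : Decidable (Spec_count_xmas_shapes grid out) := by
  unfold Spec_count_xmas_shapes; infer_instance

-- ===== CLAIM (what is proved, stated in full; the proofs are below) =====
def Claim_equal_count_xmas_shapes : Prop := ∀ (grid : List String), Dom_count_xmas_shapes grid → Pre_count_xmas_shapes grid → Spec_count_xmas_shapes grid (count_xmas_shapes grid)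

-- ===== LEMMAS AND PROOFS =====

lemma pvPairIsMS_iff (a b : Char) :
    pvPairIsMS a b = true ↔ (a = 'M' ∧ b = 'S') ∨ (a = 'S' ∧ b = 'M') := by
  unfold pvPairIsMS
  rw [PySem.Set.equal_iff]
  constructor
  · intro h
    have hM := (h 'M').mpr (by simp [PySem.Set.mem_ofList])
    have hS := (h 'S').mpr (by simp [PySem.Set.mem_ofList])
    simp only [PySem.Set.mem_ofList, List.mem_cons, List.not_mem_nil,
      or_false] at hM hS
    rcases hM with h1 | h1 <;> rcases hS with h2 | h2
    · exfalso; rw [← h1] at h2; exact absurd h2 (by decide)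
    · exact Or.inl ⟨h1.symm, h2.symm⟩
    · exact Or.inr ⟨h2.symm, h1.symm⟩
    · exfalso; rw [← h1] at h2; exact absurd h2 (by decide)
  · rintro (⟨ha, hb⟩ | ⟨ha, hb⟩) x <;> subst ha <;> subst hb <;>
      simp [PySem.Set.mem_ofList] <;> tauto

lemma ite_not_false (c x : Bool) : (if !c then false else x) = (c && x) := by
  cases c <;> simp

lemma condA_iff (grid : List String) (rows cols i j : Int) :
    (pvCell grid i j == 'A' &&
      pvCheckOffsets grid rows cols i j [(-1, -1, 1, 1), (-1, 1, 1, -1)]) = true ↔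
    ((1 ≤ i ∧ i < rows - 1) ∧ (1 ≤ j ∧ j < cols - 1) ∧
      pvDiag1 grid i j = true ∧ pvDiag2 grid i j = true) := by
  simp only [pvCheckOffsets, ite_not_false]
  simp only [pvAllInb, pvDiagOk, pvDiag1, pvDiag2, List.all_cons, List.all_nil, Bool.and_true,
    Bool.and_eq_true, decide_eq_true_eq, beq_iff_eq, pvPairIsMS_iff, List.cons.injEq, and_true,
    sub_neg_eq_add, ← sub_eq_add_neg]
  constructor
  · rintro ⟨hc, ⟨⟨hb1, hb2, hb3, hb4⟩, ⟨hb5, hb6, hb7, hb8⟩, _, _⟩, ⟨hd1, _⟩, _, hd2, _⟩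
    refine ⟨⟨by omega, by omega⟩, ⟨by omega, by omega⟩, ⟨hc, ?_⟩, hc, ?_⟩
    · rcases hd1 with ⟨h1, _, h2⟩ | ⟨h1, _, h2⟩
      · exact Or.inl ⟨h1, h2⟩
      · exact Or.inr ⟨h1, h2⟩
    · rcases hd2 with ⟨h1, _, h2⟩ | ⟨h1, _, h2⟩
      · exact Or.inl ⟨h1, h2⟩
      · exact Or.inr ⟨h1, h2⟩
  · rintro ⟨⟨hi1, hi2⟩, ⟨hj1, hj2⟩, ⟨hc, hd1⟩, _, hd2⟩
    refine ⟨hc, ⟨⟨by omega, by omega, by omega, by omega⟩, ⟨by omega, by omega, by omega, by omega⟩,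
      ⟨by omega, by omega, by omega, by omega⟩, by omega, by omega, by omega, by omega⟩, ⟨?_, ?_⟩,
      ⟨⟨by omega, by omega, by omega, by omega⟩, ⟨by omega, by omega, by omega, by omega⟩,
      ⟨by omega, by omega, by omega, by omega⟩, by omega, by omega, by omega, by omega⟩, ?_, ?_⟩
    · rcases hd1 with ⟨h1, h2⟩ | ⟨h1, h2⟩
      · exact Or.inl ⟨h1, hc, h2⟩
      · exact Or.inr ⟨h1, hc, h2⟩
    · rcases hd1 with ⟨h1, h2⟩ | ⟨h1, h2⟩
      · exact Or.inr ⟨h2, hc, h1⟩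
      · exact Or.inl ⟨h2, hc, h1⟩
    · rcases hd2 with ⟨h1, h2⟩ | ⟨h1, h2⟩
      · exact Or.inl ⟨h1, hc, h2⟩
      · exact Or.inr ⟨h1, hc, h2⟩
    · rcases hd2 with ⟨h1, h2⟩ | ⟨h1, h2⟩
      · exact Or.inr ⟨h2, hc, h1⟩
      · exact Or.inl ⟨h2, hc, h1⟩

lemma filter_pyRange_interval (a b n : Int) (h0 : 0 ≤ a) (hbn : b ≤ n) :
    (PySem.List.pyRange 0 n 1).filter (fun x => decide (a ≤ x ∧ x < b)) =
      PySem.List.pyRange a b 1 := by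
  by_cases hab : b ≤ a
  · rw [PySem.List.pyRange_one_eq_nil hab, List.filter_eq_nil_iff]
    intro x hx
    have := PySem.List.mem_pyRange_one.mp hx
    simp only [decide_eq_true_eq]
    omega
  · have hab' : a < b := lt_of_not_ge hab
    rw [PySem.List.pyRange_one_append 0 a n h0 (le_trans hab'.le hbn),
      PySem.List.pyRange_one_append a b n hab'.le hbn, List.filter_append, List.filter_append]
    have h1 : (PySem.List.pyRange 0 a 1).filter (fun x => decide (a ≤ x ∧ x < b)) = [] := by
      rw [List.filter_eq_nil_iff]; intro x hx
      have := PySem.List.mem_pyRange_one.mp hx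
      simp only [decide_eq_true_eq]; omega
    have h2 : (PySem.List.pyRange a b 1).filter (fun x => decide (a ≤ x ∧ x < b)) =
        PySem.List.pyRange a b 1 := by
      rw [List.filter_eq_self]; intro x hx
      have := PySem.List.mem_pyRange_one.mp hx
      simp only [decide_eq_true_eq]; omega
    have h3 : (PySem.List.pyRange b n 1).filter (fun x => decide (a ≤ x ∧ x < b)) = [] := by
      rw [List.filter_eq_nil_iff]; intro x hx
      have := PySem.List.mem_pyRange_one.mp hx
      simp only [decide_eq_true_eq]; omega
    rw [h1, h2, h3, List.nil_append, List.append_nil]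

lemma sum_map_ite (l : List Int) (p : Int → Bool) (g : Int → Int) :
    (l.map (fun x => if p x then g x else 0)).sum = ((l.filter p).map g).sum := by
  induction l with
  | nil => simp
  | cons x t ih => by_cases h : p x <;> simp [h, ih]

lemma sum_map_natCast (l : List Int) (f : Int → Nat) :
    (l.map (fun i => ((f i : Nat) : Int))).sum = (((l.map f).sum : Nat) : Int) := by
  induction l with
  | nil => simp
  | cons x t ih => simp [ih]

lemma nodup_pairs (I J : List Int) (p : Int → Int → Bool)
    (hI : I.Nodup) (hJ : J.Nodup) :
    (I.flatMap (fun i => ((J.filter (p i)).map (fun j => (i, j))))).Nodup := by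
  induction I with
  | nil => simp
  | cons i t ih =>
    simp only [List.flatMap_cons]
    rw [List.nodup_append]
    refine ⟨(hJ.filter _).map ?_, ih (List.nodup_cons.mp hI).2, ?_⟩
    · intro a b hab
      simpa using congrArg Prod.snd hab
    · intro a ha b hb
      simp only [List.mem_map, List.mem_filter] at ha
      obtain ⟨j, _, rfl⟩ := ha
      simp only [List.mem_flatMap, List.mem_map, List.mem_filter] at hb
      obtain ⟨i', hi', j', _, rfl⟩ := hb
      intro heq
      have hii : i = i' := congrArg Prod.fst heq
      exact (List.nodup_cons.mp hI).1 (hii ▸ hi')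

lemma condA_eq (grid : List String) (rows cols i j : Int) :
    (pvCell grid i j == 'A' &&
      pvCheckOffsets grid rows cols i j [(-1, -1, 1, 1), (-1, 1, 1, -1)]) =
    (decide (1 ≤ i ∧ i < rows - 1) &&
      (decide (1 ≤ j ∧ j < cols - 1) && (pvDiag2 grid i j && pvDiag1 grid i j))) := by
  rw [Bool.eq_iff_iff, condA_iff]
  simp only [Bool.and_eq_true, decide_eq_true_eq]
  tauto

theorem pv_main (grid : List String) :
    count_xmas_shapes grid = count_xmas_shapes_alt grid := by
  simp only [count_xmas_shapes, count_xmas_shapes_alt]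
  set rows := PySem.List.len grid with hrows
  set cols := PySem.Str.len (PySem.List.pyGetD grid 0 "") with hcols
  have hinner : ∀ (i c : Int),
      (PySem.List.pyRange 0 cols 1).foldl (fun count j =>
        if pvCell grid i j == 'A' then
          if pvCheckOffsets grid rows cols i j [(-1, -1, 1, 1), (-1, 1, 1, -1)] then count + 1
          else count
        else count) c
      = c + ((PySem.List.pyRange 0 cols 1).countP (fun j =>
          pvCell grid i j == 'A' &&
            pvCheckOffsets grid rows cols i j [(-1, -1, 1, 1), (-1, 1, 1, -1)]) : Int) := by
    intro i c
    rw [PySem.List.foldl_congr_mem _ _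
      (fun count j => if (pvCell grid i j == 'A' &&
        pvCheckOffsets grid rows cols i j [(-1, -1, 1, 1), (-1, 1, 1, -1)]) then count + 1
        else count) _
      (fun acc x _ => by by_cases h1 : (pvCell grid i x == 'A') = true <;> simp [h1])]
    exact PySem.List.foldl_if_add_one _ _ _
  have hA : (PySem.List.pyRange 0 rows 1).foldl (fun count i =>
      (PySem.List.pyRange 0 cols 1).foldl (fun count j =>
        if pvCell grid i j == 'A' then
          if pvCheckOffsets grid rows cols i j [(-1, -1, 1, 1), (-1, 1, 1, -1)] then count + 1
          else count
        else count) count) 0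
      = ((PySem.List.pyRange 1 (rows - 1) 1).map (fun i =>
          ((PySem.List.pyRange 1 (cols - 1) 1).countP (fun j =>
            pvDiag2 grid i j && pvDiag1 grid i j) : Int))).sum := by
    rw [PySem.List.foldl_congr_mem _ _
      (fun c i => c + ((PySem.List.pyRange 0 cols 1).countP (fun j =>
        pvCell grid i j == 'A' &&
          pvCheckOffsets grid rows cols i j [(-1, -1, 1, 1), (-1, 1, 1, -1)]) : Int)) _
      (fun acc x _ => hinner x acc)]
    rw [PySem.List.foldl_add]
    simp only [condA_eq, zero_add]
    have hcount : ∀ i : Int,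
        (((PySem.List.pyRange 0 cols 1).countP (fun j =>
          decide (1 ≤ i ∧ i < rows - 1) &&
            (decide (1 ≤ j ∧ j < cols - 1) && (pvDiag2 grid i j && pvDiag1 grid i j)))) : Int)
        = if decide (1 ≤ i ∧ i < rows - 1) then
            (((PySem.List.pyRange 1 (cols - 1) 1).countP (fun j =>
              pvDiag2 grid i j && pvDiag1 grid i j)) : Int)
          else 0 := by
      intro i
      by_cases hi : (1 ≤ i ∧ i < rows - 1)
      · have hd : decide (1 ≤ i ∧ i < rows - 1) = true := decide_eq_true hi
        simp only [hd, Bool.true_and, if_true]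
        congr 1
        rw [List.countP_eq_length_filter, List.countP_eq_length_filter,
          ← filter_pyRange_interval 1 (cols - 1) cols (by omega) (by omega),
          List.filter_filter]
        exact congrArg List.length (List.filter_congr (fun x _ => Bool.and_comm _ _))
      · have hd : decide (1 ≤ i ∧ i < rows - 1) = false := decide_eq_false hi
        simp [hd]
    simp only [hcount]
    rw [sum_map_ite, filter_pyRange_interval 1 (rows - 1) rows (by omega) (by omega)]
  rw [hA]
  set L1 := (PySem.List.pyRange 1 (rows - 1) 1).flatMap (fun i =>
    ((PySem.List.pyRange 1 (cols - 1) 1).filter (fun j => pvDiag1 grid i j)).map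
      (fun j => (i, j))) with hL1
  set L2 := (PySem.List.pyRange 1 (rows - 1) 1).flatMap (fun i =>
    ((PySem.List.pyRange 1 (cols - 1) 1).filter (fun j => pvDiag2 grid i j)).map
      (fun j => (i, j))) with hL2
  have hn1 : L1.Nodup := nodup_pairs _ _ _ (PySem.List.nodup_pyRange_one _ _)
    (PySem.List.nodup_pyRange_one _ _)
  rw [PySem.Set.ofList_eq_self_of_nodup _ hn1]
  simp only [PySem.Set.inter, PySem.Set.len]
  have hfc : L1.filter (fun x => (PySem.Set.ofList L2).contains x)
      = L1.filter (fun x => pvDiag2 grid x.1 x.2) := by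
    apply List.filter_congr
    intro x hx
    rw [hL1] at hx
    simp only [List.mem_flatMap, List.mem_map, List.mem_filter] at hx
    obtain ⟨i, hi, j, ⟨hj, hd1⟩, rfl⟩ := hx
    rw [Bool.eq_iff_iff]
    constructor
    · intro h
      rw [PySem.Set.contains_iff, PySem.Set.mem_ofList, hL2] at h
      simp only [List.mem_flatMap, List.mem_map, List.mem_filter] at h
      obtain ⟨i', _, j', ⟨_, hd2⟩, heq⟩ := h
      have h1 : i' = i := congrArg Prod.fst heq
      have h2 : j' = j := congrArg Prod.snd heq
      exact h1 ▸ h2 ▸ hd2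
    · intro h
      rw [PySem.Set.contains_iff, PySem.Set.mem_ofList, hL2]
      simp only [List.mem_flatMap, List.mem_map, List.mem_filter]
      exact ⟨i, hi, j, ⟨hj, h⟩, rfl⟩
  rw [hfc, hL1, List.filter_flatMap]
  simp only [List.filter_map, Function.comp_def, List.filter_filter, List.length_flatMap,
    List.length_map, List.countP_eq_length_filter]
  rw [sum_map_natCast]

-- ===== VERDICT (by name: the statement is the Claim_ definition above) =====
theorem count_xmas_shapes_spec : Claim_equal_count_xmas_shapes := by
  intro grid _ _
  unfold Spec_count_xmas_shapes
  exact pv_main grid
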